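-- pv_equiv track=rewrite | github.com/yuuforest/Softeer | python/Level 2/[21년 재직자 대회 예선] 회의실 예약.py | room_time
-- ===== SOURCE A (Python) =====
-- def room_time(reserved_time:list):
--     answer = []     # 09 - 18
--
--     tt = 9
--     for (st, et) in sorted(reserved_time):
--         if tt < st:
--             answer.append((tt, st))
--         tt = et
--
--     if tt < 18:
--         answer.append((tt, 18))
--
--     return answer
-- ===== SOURCE B (Python) =====
-- def room_time(reserved_time: list):
--     # Flatten the sorted reservations into a boundary timeline wrapped with the
--     # day limits, then recursively chunk it into (left, right) pairs, keeping
--     # the non-empty ones.  The 9/18 wrapping shifts the pairing so each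
--     # interval's end meets the next interval's start.
--     bounds = [9] + [t for iv in sorted(reserved_time) for t in iv] + [18]
--
--     def pair_up(bs):
--         if not bs:
--             return []
--         l, r, rest = bs[0], bs[1], bs[2:]
--         tail = pair_up(rest)
--         return [(l, r)] + tail if l < r else tail
--
--     return pair_up(bounds)
-- ===== Notes on version B (the rewrite author's own statement) =====
-- stated objective: alternative
-- what changed: Drops A's stateful scan carrying tt: B flattens the sorted reservations into one boundary timeline wrapped with 9 and 18 and recursively chunks it into pairs, keeping pairs with l < r.
import Mathlib
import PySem

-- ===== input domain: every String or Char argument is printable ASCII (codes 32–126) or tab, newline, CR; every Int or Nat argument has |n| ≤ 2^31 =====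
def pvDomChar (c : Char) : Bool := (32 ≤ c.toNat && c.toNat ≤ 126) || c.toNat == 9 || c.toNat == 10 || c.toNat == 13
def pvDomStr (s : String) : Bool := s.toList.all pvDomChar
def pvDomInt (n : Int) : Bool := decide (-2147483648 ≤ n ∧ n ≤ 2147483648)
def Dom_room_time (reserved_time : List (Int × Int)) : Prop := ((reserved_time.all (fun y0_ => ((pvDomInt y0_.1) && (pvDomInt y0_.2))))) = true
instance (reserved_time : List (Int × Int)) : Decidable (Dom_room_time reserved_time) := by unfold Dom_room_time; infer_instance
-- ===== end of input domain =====

-- B replaces A's stateful tt-carrying scan by flattening the sorted reservations into a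
-- boundary timeline wrapped with 9/18 and recursively chunking it into pairs; alternative
-- decomposition, same cost.

-- ===== PORT A =====
def room_time (reserved_time : List (Int × Int)) : List (Int × Int) :=
  let res := (PySem.List.sorted2 reserved_time Prod.fst Prod.snd).foldl
    (fun (acc : List (Int × Int) × Int) p =>
      let ans := acc.1
      let tt := acc.2
      let st := p.1
      let et := p.2
      (if tt < st then ans ++ [(tt, st)] else ans, et))
    ([], 9)
  if res.2 < 18 then res.1 ++ [(res.2, 18)] else res.1

-- ===== PORT B =====
-- pair_up: recursive chunking of the boundary list into consecutive pairs, keeping l < r.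
-- (Source B's bs[1] on a singleton would raise; the wrapped timeline always has even length,
-- so the [_] case is unreachable and returns [] here.)
def pairUp : List Int → List (Int × Int)
  | [] => []
  | [_] => []
  | l :: r :: rest => if l < r then (l, r) :: pairUp rest else pairUp rest

def room_time_alt (reserved_time : List (Int × Int)) : List (Int × Int) :=
  let bounds : List Int :=
    9 :: (PySem.List.sorted2 reserved_time Prod.fst Prod.snd).flatMap (fun p => [p.1, p.2]) ++ [18]
  pairUp bounds

-- ===== PRECONDITION & SPEC =====
def Spec_room_time (reserved_time : List (Int × Int)) (out : List (Int × Int)) : Prop := out = room_time_alt reserved_time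
instance (reserved_time : List (Int × Int)) (out : List (Int × Int)) : Decidable (Spec_room_time reserved_time out) := by unfold Spec_room_time; infer_instance

-- ===== CLAIM (what is proved, stated in full; the proofs are below) =====
def Claim_equal_room_time : Prop := ∀ (reserved_time : List (Int × Int)), Dom_room_time reserved_time → Spec_room_time reserved_time (room_time reserved_time)

-- ===== LEMMAS AND PROOFS =====

-- A's loop from any carried state (ans, t), followed by the final 18-check, equals
-- ans followed by B's pair-up of the timeline seeded with t.
lemma room_time_loop (l : List (Int × Int)) (ans : List (Int × Int)) (t : Int) :
    (let res := l.foldl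
        (fun (acc : List (Int × Int) × Int) p =>
          (if acc.2 < p.1 then acc.1 ++ [(acc.2, p.1)] else acc.1, p.2)) (ans, t)
     if res.2 < 18 then res.1 ++ [(res.2, 18)] else res.1)
    = ans ++ pairUp (t :: l.flatMap (fun p => [p.1, p.2]) ++ [18]) := by
  induction l generalizing ans t with
  | nil =>
      by_cases h : t < 18 <;> simp [pairUp, h]
  | cons hd tl ih =>
      simp only [List.foldl_cons, List.flatMap_cons, List.cons_append, List.append_assoc]
      rw [ih]
      by_cases h : t < hd.1
      · simp [pairUp, h]
      · simp [pairUp, h]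

theorem room_time_spec_aux (rt : List (Int × Int)) :
    room_time rt = room_time_alt rt := by
  unfold room_time room_time_alt
  simpa using room_time_loop (PySem.List.sorted2 rt Prod.fst Prod.snd) [] 9

-- ===== VERDICT (by name: the statement is the Claim_ definition above) =====
theorem room_time_spec : Claim_equal_room_time := by
  intro rt _
  unfold Spec_room_time
  exact room_time_spec_aux rt
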